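-- pv_equiv track=rewrite | github.com/ipsamitt/MeanSCRAPT | preprocess_and_mean.py | generate_kmers
-- ===== SOURCE A (Python) =====
-- def generate_kmers(prefix, length, nucleotides):
--     if length == 0:
--         return [prefix]
--     else:
--         result = []
--         for nucleotide in nucleotides:
--             result.extend(generate_kmers(prefix + nucleotide, length - 1, nucleotides))
--         return result
-- ===== SOURCE B (Python) =====
-- def generate_kmers(prefix, length, nucleotides):
--     result = [prefix]
--     for _ in range(length):
--         if not result:
--             break
--         new_result = []
--         for s in result:
--             for nucleotide in nucleotides:
--                 new_result.append(s + nucleotide)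
--         result = new_result
--     return result
-- ===== Notes on version B (the rewrite author's own statement) =====
-- stated objective: alternative
-- what changed: Replaces A's depth-first recursion with an iterative breadth-first layer-building loop (each pass extends every current string by every nucleotide, breaking early once the layer is empty), producing the same ordered list without recursion.
-- outside the precondition, e.g. on generate_kmers('', -1, []): A returns [], B returns ['']
import Mathlib
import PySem

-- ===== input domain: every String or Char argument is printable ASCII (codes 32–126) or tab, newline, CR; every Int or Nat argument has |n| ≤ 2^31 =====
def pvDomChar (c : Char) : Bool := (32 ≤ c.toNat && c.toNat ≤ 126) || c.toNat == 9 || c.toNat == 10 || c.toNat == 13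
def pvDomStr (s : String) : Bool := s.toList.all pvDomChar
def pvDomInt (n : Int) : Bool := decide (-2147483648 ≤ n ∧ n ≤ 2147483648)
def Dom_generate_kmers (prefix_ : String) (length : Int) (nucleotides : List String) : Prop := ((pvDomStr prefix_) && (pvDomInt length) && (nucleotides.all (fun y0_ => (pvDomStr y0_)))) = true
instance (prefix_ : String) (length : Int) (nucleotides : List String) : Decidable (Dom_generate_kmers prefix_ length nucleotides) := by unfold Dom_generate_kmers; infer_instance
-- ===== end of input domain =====

-- B rebuilds the k-mer list iteratively layer by layer instead of A's depth-first recursion; same ordered output.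


-- ===== PORT A =====
-- A's recursion on `length`, transcribed on the Nat value of length (exact for 0 ≤ length; Pre_ admits exactly that)
def gkA (prefix_ : String) (n : Nat) (nucleotides : List String) : List String :=
  match n with
  | 0 => [prefix_]
  | m + 1 => nucleotides.foldl (fun result nucleotide => result ++ gkA (prefix_ ++ nucleotide) m nucleotides) []

def generate_kmers (prefix_ : String) (length : Int) (nucleotides : List String) : List String :=
  gkA prefix_ length.toNat nucleotides

-- ===== PORT B =====
-- one layer step: extend every current string by every nucleotide, in order
def gkStep (nucleotides : List String) (result : List String) : List String :=
  result.foldl (fun new_result s => nucleotides.foldl (fun nr nucleotide => nr ++ [s ++ nucleotide]) new_result) []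

-- the 'for _ in range(length)' loop with its early break once result is empty; exact for 0 ≤ length
def gkLoop (nucleotides : List String) : Nat → List String → List String
  | 0, result => result
  | n + 1, result => if result = [] then result else gkLoop nucleotides n (gkStep nucleotides result)

def generate_kmers_alt (prefix_ : String) (length : Int) (nucleotides : List String) : List String :=
  gkLoop nucleotides length.toNat [prefix_]

-- ===== PRECONDITION & SPEC =====
-- Pre_ excludes negative length: there A recurses into RecursionError for nonempty nucleotides,
-- and the [] it returns for empty nucleotides is an accident of the loop never running.
def Pre_generate_kmers (prefix_ : String) (length : Int) (nucleotides : List String) : Prop := 0 ≤ length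
instance (prefix_ : String) (length : Int) (nucleotides : List String) : Decidable (Pre_generate_kmers prefix_ length nucleotides) := by unfold Pre_generate_kmers; infer_instance
def pvWitness_generate_kmers : String × Int × List String := ("x", 2, ["A", "C"])

def Spec_generate_kmers (prefix_ : String) (length : Int) (nucleotides : List String) (out : List String) : Prop := out = generate_kmers_alt prefix_ length nucleotides
instance (prefix_ : String) (length : Int) (nucleotides : List String) (out : List String) : Decidable (Spec_generate_kmers prefix_ length nucleotides out) := by unfold Spec_generate_kmers; infer_instance

-- ===== CLAIM (what is proved, stated in full; the proofs are below) =====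
def Claim_equal_generate_kmers : Prop := ∀ (prefix_ : String) (length : Int) (nucleotides : List String), Dom_generate_kmers prefix_ length nucleotides → Pre_generate_kmers prefix_ length nucleotides → Spec_generate_kmers prefix_ length nucleotides (generate_kmers prefix_ length nucleotides)

-- ===== LEMMAS AND PROOFS =====

-- a left fold accumulating appends is a flatMap
lemma foldl_append_flatMap {α β : Type} (f : α → List β) :
    ∀ (l : List α) (init : List β),
      l.foldl (fun acc x => acc ++ f x) init = init ++ l.flatMap f := by
  intro l
  induction l with
  | nil => intro init; simp
  | cons x t ih => intro init; simp [ih]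

-- one layer equals a flatMap
lemma gkStep_eq (nucleotides xs : List String) :
    gkStep nucleotides xs = xs.flatMap (fun s => nucleotides.map (fun n => s ++ n)) := by
  unfold gkStep
  have hinner : ∀ (s : String) (init : List String),
      nucleotides.foldl (fun nr nucleotide => nr ++ [s ++ nucleotide]) init
        = init ++ nucleotides.map (fun n => s ++ n) := by
    intro s init
    rw [foldl_append_flatMap (fun nucleotide => [s ++ nucleotide]) nucleotides init]
    induction nucleotides <;> simp_all
  simp only [hinner]
  exact foldl_append_flatMap _ xs []

-- A's recursive step as a flatMap
lemma gkA_succ (prefix_ : String) (m : Nat) (nucleotides : List String) :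
    gkA prefix_ (m + 1) nucleotides
      = (nucleotides.map (fun n => prefix_ ++ n)).flatMap (fun s => gkA s m nucleotides) := by
  show nucleotides.foldl (fun result nucleotide => result ++ gkA (prefix_ ++ nucleotide) m nucleotides) []
      = _
  rw [List.flatMap_map, foldl_append_flatMap]
  simp

-- the layer loop starting from any list computes A's recursion pointwise
lemma gkLoop_eq (nucleotides : List String) :
    ∀ (n : Nat) (xs : List String),
      gkLoop nucleotides n xs = xs.flatMap (fun s => gkA s n nucleotides) := by
  intro n
  induction n with
  | zero => intro xs; simp [gkLoop, gkA]
  | succ m ih =>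
      intro xs
      by_cases h : xs = []
      · simp [gkLoop, h]
      · rw [show gkLoop nucleotides (m + 1) xs = gkLoop nucleotides m (gkStep nucleotides xs)
             from by simp [gkLoop, h]]
        rw [ih (gkStep nucleotides xs), gkStep_eq]
        rw [List.flatMap_assoc]
        refine List.flatMap_congr ?_
        intro s _
        rw [gkA_succ]

-- ===== VERDICT (by name: the statement is the Claim_ definition above) =====
theorem generate_kmers_spec : Claim_equal_generate_kmers := by
  intro prefix_ length nucleotides _ hpre
  unfold Spec_generate_kmers generate_kmers generate_kmers_alt
  rw [gkLoop_eq]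
  simp
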